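-- pv_equiv track=rewrite | github.com/danglingmind/python_practice | hackerrankcombination.py | totalTriplets
-- ===== SOURCE A (Python) =====
-- from itertools import combinations
--
-- def totalTriplets(capacity, desiredCapacity):
--     l = len(capacity)
--     count = 0
--     ind = []
--     for i in range(l):
--         ind.append(i)
--     #     get the combinations of indexes
--     indexcombi = combinations(ind, 3)
--     for j in indexcombi:
--         if (j[0] + 1 == j[1] or j[1] + 1 == j[2]):
--             if capacity[j[0]]*capacity[j[1]]*capacity[j[2]] == desiredCapacity:
--                 count+=1
--     return count
-- ===== SOURCE B (Python) =====
-- def totalTriplets(capacity, desiredCapacity):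
--     # Inclusion-exclusion over the two adjacency cases: count (i, i+1, k) pairs-with-tail,
--     # plus (i, j, j+1) head-with-pairs, minus fully consecutive (i, i+1, i+2) counted twice.
--     n = len(capacity)
--     left = sum(1 for i in range(n - 1)
--                  for k in range(i + 2, n)
--                if capacity[i] * capacity[i + 1] * capacity[k] == desiredCapacity)
--     right = sum(1 for i in range(n)
--                   for j in range(i + 1, n - 1)
--                 if capacity[i] * capacity[j] * capacity[j + 1] == desiredCapacity)
--     both = sum(1 for i in range(n - 2)
--                if capacity[i] * capacity[i + 1] * capacity[i + 2] == desiredCapacity)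
--     return left + right - both
-- ===== Notes on version B (the rewrite author's own statement) =====
-- stated objective: faster
-- what changed: A scans all C(n,3) index triples and tests the adjacency condition on each; B counts by inclusion-exclusion over the two adjacency cases with two double loops (adjacent pair plus a third index) minus the consecutive triples counted twice.
import Mathlib
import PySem

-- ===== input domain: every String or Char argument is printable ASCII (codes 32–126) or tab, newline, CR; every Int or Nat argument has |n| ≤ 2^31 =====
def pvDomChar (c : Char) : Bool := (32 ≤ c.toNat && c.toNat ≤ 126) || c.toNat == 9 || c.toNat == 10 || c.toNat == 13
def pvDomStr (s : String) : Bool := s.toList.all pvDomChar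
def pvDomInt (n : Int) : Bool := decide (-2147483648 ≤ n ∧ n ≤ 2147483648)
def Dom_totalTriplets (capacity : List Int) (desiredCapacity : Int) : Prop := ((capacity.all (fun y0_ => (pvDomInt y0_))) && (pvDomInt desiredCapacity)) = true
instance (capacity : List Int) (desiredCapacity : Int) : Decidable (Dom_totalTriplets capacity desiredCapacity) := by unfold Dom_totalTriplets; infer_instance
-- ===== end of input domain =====

-- B replaces A's scan of all O(n^3) index triples by inclusion-exclusion over the two
-- adjacency cases (i,i+1,k), (i,j,j+1) minus the doubly counted (i,i+1,i+2): O(n^2).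

-- ===== PORT A =====
-- itertools.combinations(range(l), 3): the lexicographic list of triples i < j < k < l
def pvCombos3 (n : Nat) : List (Nat × Nat × Nat) :=
  (List.range n).flatMap (fun i =>
    (List.range' (i + 1) (n - (i + 1))).flatMap (fun j =>
      (List.range' (j + 1) (n - (j + 1))).map (fun k => (i, j, k))))

def totalTriplets (capacity : List Int) (desiredCapacity : Int) : Int :=
  (pvCombos3 capacity.length).foldl
    (fun count j =>
      if j.1 + 1 = j.2.1 ∨ j.2.1 + 1 = j.2.2 then
        if capacity.getD j.1 0 * capacity.getD j.2.1 0 * capacity.getD j.2.2 0 = desiredCapacity then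
          count + 1
        else count
      else count) 0

-- ===== PORT B =====
def totalTriplets_alt (capacity : List Int) (desiredCapacity : Int) : Int :=
  let n := capacity.length
  let left := ((List.range (n - 1)).map (fun i =>
      (List.range' (i + 2) (n - (i + 2))).countP (fun k =>
        decide (capacity.getD i 0 * capacity.getD (i + 1) 0 * capacity.getD k 0 = desiredCapacity)))).sum
  let right := ((List.range n).map (fun i =>
      (List.range' (i + 1) ((n - 1) - (i + 1))).countP (fun j =>
        decide (capacity.getD i 0 * capacity.getD j 0 * capacity.getD (j + 1) 0 = desiredCapacity)))).sum
  let both := (List.range (n - 2)).countP (fun i =>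
      decide (capacity.getD i 0 * capacity.getD (i + 1) 0 * capacity.getD (i + 2) 0 = desiredCapacity))
  (left : Int) + (right : Int) - (both : Int)

-- ===== PRECONDITION & SPEC =====
def Spec_totalTriplets (capacity : List Int) (desiredCapacity : Int) (out : Int) : Prop := out = totalTriplets_alt capacity desiredCapacity
instance (capacity : List Int) (desiredCapacity : Int) (out : Int) : Decidable (Spec_totalTriplets capacity desiredCapacity out) := by unfold Spec_totalTriplets; infer_instance

-- ===== CLAIM (what is proved, stated in full; the proofs are below) =====
def Claim_equal_totalTriplets : Prop := ∀ (capacity : List Int) (desiredCapacity : Int), Dom_totalTriplets capacity desiredCapacity → Spec_totalTriplets capacity desiredCapacity (totalTriplets capacity desiredCapacity)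

-- ===== LEMMAS AND PROOFS =====

-- A's counting fold is countP of the conjunction of its two nested conditions.
theorem pv_foldl_count {α : Type} (p q : α → Prop) [DecidablePred p] [DecidablePred q]
    (l : List α) (a : Int) :
    l.foldl (fun c x => if p x then (if q x then c + 1 else c) else c) a
      = a + l.countP (fun x => decide (p x) && decide (q x)) := by
  induction l generalizing a with
  | nil => simp
  | cons x xs ih =>
    by_cases hp : p x <;> by_cases hq : q x <;>
      simp [List.countP_cons, hp, hq, ih] <;> push_cast <;> ring

-- inclusion-exclusion on countP
theorem pv_countP_or {α : Type} (l : List α) (p q : α → Bool) :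
    l.countP (fun x => p x || q x) + l.countP (fun x => p x && q x)
      = l.countP p + l.countP q := by
  induction l with
  | nil => simp
  | cons x xs ih =>
    cases hp : p x <;> cases hq : q x <;> simp [List.countP_cons, hp, hq] <;> omega

theorem pv_countP_flatMap {α β : Type} (l : List α) (f : α → List β) (p : β → Bool) :
    (l.flatMap f).countP p = (l.map (fun x => (f x).countP p)).sum := by
  induction l with
  | nil => simp
  | cons x xs ih => simp [List.flatMap_cons, List.countP_append, ih]

theorem pv_countP_eq_sum {α : Type} (l : List α) (q : α → Bool) :
    l.countP q = (l.map (fun x => if q x then 1 else 0)).sum := by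
  induction l with
  | nil => simp
  | cons x xs ih => cases h : q x <;> simp [h, ih] <;> omega

theorem pv_countP_const_and {α : Type} (P : Prop) [Decidable P] (q : α → Bool) (l : List α) :
    l.countP (fun x => decide P && q x) = if P then l.countP q else 0 := by
  by_cases h : P <;> simp [h]

-- only the first element of range' s m can equal s
theorem pv_countP_head (s m : Nat) (q : Nat → Bool) :
    (List.range' s m).countP (fun k => decide (s = k) && q k)
      = if 0 < m then (if q s then 1 else 0) else 0 := by
  cases m with
  | zero => simp
  | succ m =>
    have htail : (List.range' (s + 1) m).countP (fun k => decide (s = k) && q k) = 0 := by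
      rw [List.countP_eq_zero]
      intro k hk
      have := (List.mem_range'_1.mp hk).1
      simp; omega
    cases h : q s <;> simp [List.range'_succ, List.countP_cons, htail, h]

theorem pv_sum_range'_single (s m : Nat) (g : Nat → Nat) :
    ((List.range' s m).map (fun j => if s = j then g j else 0)).sum
      = if 0 < m then g s else 0 := by
  cases m with
  | zero => simp
  | succ m =>
    have htail : ((List.range' (s + 1) m).map (fun j => if s = j then g j else 0)).sum = 0 := by
      apply List.sum_eq_zero
      intro x hx
      obtain ⟨j, hj, rfl⟩ := List.mem_map.mp hx
      have := (List.mem_range'_1.mp hj).1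
      have : ¬ (s = j) := by omega
      simp [this]
    simp [List.range'_succ, htail]

theorem pv_sum_range_lt (n m : Nat) (h : m ≤ n) (g : Nat → Nat) :
    ((List.range n).map (fun i => if i < m then g i else 0)).sum
      = ((List.range m).map g).sum := by
  induction n with
  | zero => interval_cases m; simp
  | succ n ih =>
    by_cases hm : m = n + 1
    · subst hm
      congr 1
      apply List.map_congr_left
      intro i hi
      have := List.mem_range.mp hi
      simp [this]
    · have hm' : m ≤ n := by omega
      rw [List.range_succ, List.map_append, List.sum_append, ih hm']
      have : ¬ (n < m) := by omega
      simp [this]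

theorem pv_sum_range_trim (n t : Nat) (g : Nat → Nat) :
    ((List.range n).map (fun i => if i + t < n then g i else 0)).sum
      = ((List.range (n - t)).map g).sum := by
  have hcong : ∀ i : Nat, (if i + t < n then g i else 0) = (if i < n - t then g i else 0) := by
    intro i
    have h : (i + t < n) ↔ (i < n - t) := by omega
    simp [h]
  simp only [hcong]
  exact pv_sum_range_lt n (n - t) (by omega) g

theorem pv_sum_range'_trim (s n : Nat) (hs : s ≤ n) (g : Nat → Nat) :
    ((List.range' s (n - s)).map (fun j => if j + 1 < n then g j else 0)).sum
      = ((List.range' s ((n - 1) - s)).map g).sum := by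
  suffices h : ∀ m s, s + m = n →
      ((List.range' s m).map (fun j => if j + 1 < n then g j else 0)).sum
        = ((List.range' s ((n - 1) - s)).map g).sum by
    have hns : n - s = n - s := rfl
    have := h (n - s) s (by omega)
    simpa using this
  intro m
  induction m with
  | zero =>
    intro s hm
    have : (n - 1) - s = 0 := by omega
    simp [this]
  | succ m ih =>
    intro s hm
    rw [List.range'_succ, List.map_cons, List.sum_cons]
    have hrec := ih (s + 1) (by omega)
    have h1 : (n - 1) - (s + 1) = m - 1 := by omega
    rw [hrec, h1]
    have h2 : (n - 1) - s = m := by omega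
    rw [h2]
    cases m with
    | zero =>
      have : ¬ (s + 1 < n) := by omega
      simp [this]
    | succ m' =>
      have : s + 1 < n := by omega
      rw [List.range'_succ, List.map_cons, List.sum_cons]
      simp [this]

-- the (i, i+1, k) case of the inclusion-exclusion
theorem pv_left_eq (n : Nat) (R : Nat → Nat → Nat → Bool) :
    (pvCombos3 n).countP (fun t => decide (t.1 + 1 = t.2.1) && R t.1 t.2.1 t.2.2)
      = ((List.range (n - 1)).map (fun i =>
          (List.range' (i + 2) (n - (i + 2))).countP (fun k => R i (i + 1) k))).sum := by
  unfold pvCombos3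
  rw [pv_countP_flatMap]
  have hinner : ∀ i : Nat,
      ((List.range' (i + 1) (n - (i + 1))).flatMap (fun j =>
        (List.range' (j + 1) (n - (j + 1))).map (fun k => (i, j, k)))).countP
          (fun t => decide (t.1 + 1 = t.2.1) && R t.1 t.2.1 t.2.2)
        = if i + 1 < n then
            (List.range' (i + 2) (n - (i + 2))).countP (fun k => R i (i + 1) k)
          else 0 := by
    intro i
    rw [pv_countP_flatMap]
    have hj : ∀ j : Nat,
        ((List.range' (j + 1) (n - (j + 1))).map (fun k => ((i, j, k) : Nat × Nat × Nat))).countP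
            (fun t => decide (t.1 + 1 = t.2.1) && R t.1 t.2.1 t.2.2)
          = if i + 1 = j then (List.range' (j + 1) (n - (j + 1))).countP (fun k => R i j k) else 0 := by
      intro j
      rw [List.countP_map]
      exact pv_countP_const_and (i + 1 = j) _ _
    simp only [hj]
    rw [pv_sum_range'_single (i + 1) (n - (i + 1))
      (fun j => (List.range' (j + 1) (n - (j + 1))).countP (fun k => R i j k))]
    have h : (0 < n - (i + 1)) ↔ (i + 1 < n) := by omega
    simp [h]
  simp only [hinner]
  have := pv_sum_range_trim n 1 (fun i =>
    (List.range' (i + 2) (n - (i + 2))).countP (fun k => R i (i + 1) k))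
  simpa using this

-- the (i, j, j+1) case of the inclusion-exclusion
theorem pv_right_eq (n : Nat) (R : Nat → Nat → Nat → Bool) :
    (pvCombos3 n).countP (fun t => decide (t.2.1 + 1 = t.2.2) && R t.1 t.2.1 t.2.2)
      = ((List.range n).map (fun i =>
          (List.range' (i + 1) ((n - 1) - (i + 1))).countP (fun j => R i j (j + 1)))).sum := by
  unfold pvCombos3
  rw [pv_countP_flatMap]
  congr 1
  apply List.map_congr_left
  intro i hi
  have hi' : i < n := List.mem_range.mp hi
  rw [pv_countP_flatMap]
  have hj : ∀ j : Nat,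
      ((List.range' (j + 1) (n - (j + 1))).map (fun k => ((i, j, k) : Nat × Nat × Nat))).countP
          (fun t => decide (t.2.1 + 1 = t.2.2) && R t.1 t.2.1 t.2.2)
        = if j + 1 < n then (if R i j (j + 1) then 1 else 0) else 0 := by
    intro j
    rw [List.countP_map]
    have hh := pv_countP_head (j + 1) (n - (j + 1)) (fun k => R i j k)
    have h : (0 < n - (j + 1)) ↔ (j + 1 < n) := by omega
    rw [if_congr h rfl rfl] at hh
    exact hh
  simp only [hj]
  have := pv_sum_range'_trim (i + 1) n (by omega) (fun j => if R i j (j + 1) then 1 else 0)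
  rw [this]
  exact (pv_countP_eq_sum _ _).symm

-- the doubly counted consecutive triples (i, i+1, i+2)
theorem pv_both_eq (n : Nat) (R : Nat → Nat → Nat → Bool) :
    (pvCombos3 n).countP (fun t =>
        decide (t.1 + 1 = t.2.1) && (decide (t.2.1 + 1 = t.2.2) && R t.1 t.2.1 t.2.2))
      = (List.range (n - 2)).countP (fun i => R i (i + 1) (i + 2)) := by
  unfold pvCombos3
  rw [pv_countP_flatMap]
  have hinner : ∀ i : Nat,
      ((List.range' (i + 1) (n - (i + 1))).flatMap (fun j =>
        (List.range' (j + 1) (n - (j + 1))).map (fun k => (i, j, k)))).countP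
          (fun t => decide (t.1 + 1 = t.2.1) && (decide (t.2.1 + 1 = t.2.2) && R t.1 t.2.1 t.2.2))
        = if i + 2 < n then (if R i (i + 1) (i + 2) then 1 else 0) else 0 := by
    intro i
    rw [pv_countP_flatMap]
    have hj : ∀ j : Nat,
        ((List.range' (j + 1) (n - (j + 1))).map (fun k => ((i, j, k) : Nat × Nat × Nat))).countP
            (fun t => decide (t.1 + 1 = t.2.1) && (decide (t.2.1 + 1 = t.2.2) && R t.1 t.2.1 t.2.2))
          = if i + 1 = j then
              (if j + 1 < n then (if R i j (j + 1) then 1 else 0) else 0)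
            else 0 := by
      intro j
      rw [List.countP_map]
      have h1 := pv_countP_const_and (i + 1 = j) (fun k => decide (j + 1 = k) && R i j k)
        (List.range' (j + 1) (n - (j + 1)))
      have h2 := pv_countP_head (j + 1) (n - (j + 1)) (fun k => R i j k)
      have h : (0 < n - (j + 1)) ↔ (j + 1 < n) := by omega
      rw [h2, if_congr h rfl rfl] at h1
      exact h1
    simp only [hj]
    rw [pv_sum_range'_single (i + 1) (n - (i + 1))
      (fun j => if j + 1 < n then (if R i j (j + 1) then 1 else 0) else 0)]
    by_cases h2 : i + 2 < n
    · have h1 : 0 < n - (i + 1) := by omega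
      simp [h1, h2]
    · by_cases h1 : 0 < n - (i + 1) <;> simp [h1, h2] <;> omega
  simp only [hinner]
  rw [pv_countP_eq_sum]
  have := pv_sum_range_trim n 2 (fun i => if R i (i + 1) (i + 2) then 1 else 0)
  simpa using this

theorem totalTriplets_eq (capacity : List Int) (desiredCapacity : Int) :
    totalTriplets capacity desiredCapacity = totalTriplets_alt capacity desiredCapacity := by
  unfold totalTriplets totalTriplets_alt
  rw [pv_foldl_count (fun t : Nat × Nat × Nat => t.1 + 1 = t.2.1 ∨ t.2.1 + 1 = t.2.2)
    (fun t : Nat × Nat × Nat =>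
      capacity.getD t.1 0 * capacity.getD t.2.1 0 * capacity.getD t.2.2 0 = desiredCapacity)]
  have hdist : ∀ a b c : Bool, ((a || b) && c) = (a && c || b && c) := by decide
  have hboth : ∀ a b c : Bool, ((a && c) && (b && c)) = (a && (b && c)) := by decide
  set R : Nat → Nat → Nat → Bool := fun i j k =>
    decide (capacity.getD i 0 * capacity.getD j 0 * capacity.getD k 0 = desiredCapacity) with hR
  have key := pv_countP_or (pvCombos3 capacity.length)
    (fun t => decide (t.1 + 1 = t.2.1) && R t.1 t.2.1 t.2.2)
    (fun t => decide (t.2.1 + 1 = t.2.2) && R t.1 t.2.1 t.2.2)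
  have hor : (pvCombos3 capacity.length).countP
      (fun t => decide (t.1 + 1 = t.2.1 ∨ t.2.1 + 1 = t.2.2) && R t.1 t.2.1 t.2.2)
      = (pvCombos3 capacity.length).countP
        (fun t => (decide (t.1 + 1 = t.2.1) && R t.1 t.2.1 t.2.2)
          || (decide (t.2.1 + 1 = t.2.2) && R t.1 t.2.1 t.2.2)) := by
    apply List.countP_congr
    intro t _
    by_cases h1 : t.1 + 1 = t.2.1 <;> by_cases h2 : t.2.1 + 1 = t.2.2 <;> simp [h1, h2]
  have hand : (pvCombos3 capacity.length).countP
      (fun t => (decide (t.1 + 1 = t.2.1) && R t.1 t.2.1 t.2.2)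
        && (decide (t.2.1 + 1 = t.2.2) && R t.1 t.2.1 t.2.2))
      = (pvCombos3 capacity.length).countP
        (fun t => decide (t.1 + 1 = t.2.1) && (decide (t.2.1 + 1 = t.2.2) && R t.1 t.2.1 t.2.2)) := by
    apply List.countP_congr
    intro t _
    simp [hboth]
  rw [← hor, hand] at key
  rw [pv_left_eq capacity.length R, pv_right_eq capacity.length R,
    pv_both_eq capacity.length R] at key
  simp only [hR] at key ⊢
  omega

-- ===== VERDICT (by name: the statement is the Claim_ definition above) =====
theorem totalTriplets_spec : Claim_equal_totalTriplets := by
  intro capacity desiredCapacity _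
  exact totalTriplets_eq capacity desiredCapacity
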